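-- pv_equiv track=rewrite | github.com/SebaColipe/app_varios | excel_python.py | duplicados_horas
-- ===== SOURCE A (Python) =====
-- def horas_minutos_digitos(hora, min):
--     if min == "":
--         min = "0"
--     if hora == "":
--         hora = "0"
--     horas = ""
--     minutos = ""
--     for i in hora:
--         if i.isdigit():
--             horas+=i
--     for i in min:
--         if i.isdigit():
--             minutos += i
--     return int(horas), int(minutos)
--
-- def hora_minuto_split(texto):
--     if " y " in texto:
--         hora, min = texto.split(" y ")
--         horas, minutos = horas_minutos_digitos(hora, min)
--         return horas, minutos
--     elif "hora" in texto:
--         return horas_minutos_digitos(texto,"")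
--     else:
--         return horas_minutos_digitos("",texto)
--
-- def horas_texto_a_numero(texto, texto_2):
--
--
--     horas, minutos = hora_minuto_split(texto)
--
--     horas_2, minutos_2 = hora_minuto_split(texto_2)
--
--     horas += horas_2
--     minutos += minutos_2
--     if minutos >59:
--         horas = horas + minutos//60
--         minutos = minutos%60
--     horas = str(horas)
--     minutos = str(minutos)
--
--     text = ""
--     if minutos != "0" and horas:
--         text = horas + " horas y " + minutos + " min"
--         if int(minutos) < 10:
--             return text, str(10+int(horas))+":0"+minutos
--         return text, str(10+int(horas))+":"+minutos
--     elif horas: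
--         if int(horas) == 1:
--             return "1 hora", "11:00"
--         return horas + " horas", str(10+int(horas))+":00"
--     else:
--         if int(minutos) < 10:
--             return minutos + " min", "10:0"+minutos
--         return minutos + " min", "10:"+minutos
--
-- def duplicados_horas(lista_horas):
--     dias = {}
--     for i in range(len(lista_horas)):
--         if lista_horas[i][0] in dias:
--             hora_final_texto, hora_final = horas_texto_a_numero(lista_horas[i][4], dias[lista_horas[i][0]][4])
--             #                                 29/04             10:00             11:00        Descripcion       1 hora
--             dias[lista_horas[i][0]] = [lista_horas[i][0], lista_horas[i][1],  hora_final, lista_horas[i][3], hora_final_texto   ]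
--         else:
--             dias[lista_horas[i][0]] = lista_horas[i]
--     return list(dias.values())
-- ===== SOURCE B (Python) =====
-- def horas_minutos_digitos(hora, min):
--     if min == "":
--         min = "0"
--     if hora == "":
--         hora = "0"
--     horas = ""
--     minutos = ""
--     for i in hora:
--         if i.isdigit():
--             horas+=i
--     for i in min:
--         if i.isdigit():
--             minutos += i
--     return int(horas), int(minutos)
--
-- def hora_minuto_split(texto):
--     if " y " in texto:
--         hora, min = texto.split(" y ")
--         horas, minutos = horas_minutos_digitos(hora, min)
--         return horas, minutos
--     elif "hora" in texto:
--         return horas_minutos_digitos(texto,"")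
--     else:
--         return horas_minutos_digitos("",texto)
--
-- def _combina(texto_nuevo, texto_previo):
--     h1, m1 = hora_minuto_split(texto_nuevo)
--     h2, m2 = hora_minuto_split(texto_previo)
--     extra, minutos = divmod(m1 + m2, 60)
--     horas = str(h1 + h2 + extra)
--     if minutos:
--         mm = str(minutos)
--         return horas + " horas y " + mm + " min", str(10 + int(horas)) + ":" + mm.zfill(2)
--     if int(horas) == 1:
--         return "1 hora", "11:00"
--     return horas + " horas", str(10 + int(horas)) + ":00"
--
-- def _grupo(dia, filas):
--     if len(filas) == 1:
--         return filas[0]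
--     texto, reloj = filas[0][4], ""
--     for fila in filas[1:]:
--         texto, reloj = _combina(fila[4], texto)
--     ultima = filas[-1]
--     return [dia, ultima[1], reloj, ultima[3], texto]
--
-- def duplicados_horas(lista_horas):
--     grupos = {}
--     for fila in lista_horas:
--         grupos.setdefault(fila[0], []).append(fila)
--     return [_grupo(dia, filas) for dia, filas in grupos.items()]
-- ===== Notes on version B (the rewrite author's own statement) =====
-- stated objective: alternative
-- what changed: B replaces A's single-pass dict of representative rows (rebuilt on every key collision inside the scan) with a two-phase group-by: first bucket the rows per day in first-seen order, then emit each bucket once - singletons pass through, larger buckets are folded with a new combiner that normalizes minutes with one unconditional divmod and pads the clock minutes with zfill instead of A's conditional carry and '<10' padding branch.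
import Mathlib
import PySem

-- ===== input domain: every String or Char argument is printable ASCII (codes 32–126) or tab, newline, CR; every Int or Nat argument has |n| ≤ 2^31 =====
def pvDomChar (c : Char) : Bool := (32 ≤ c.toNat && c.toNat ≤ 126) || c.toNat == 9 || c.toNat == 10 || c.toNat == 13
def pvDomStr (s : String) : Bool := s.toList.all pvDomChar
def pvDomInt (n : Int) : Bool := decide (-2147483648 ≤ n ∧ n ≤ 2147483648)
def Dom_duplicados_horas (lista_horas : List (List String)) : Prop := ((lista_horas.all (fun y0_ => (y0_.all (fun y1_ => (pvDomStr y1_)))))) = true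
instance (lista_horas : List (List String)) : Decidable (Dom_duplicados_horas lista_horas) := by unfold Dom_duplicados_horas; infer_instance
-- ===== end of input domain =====

-- A aggregates duplicate-day time rows via a dict of combined rows rebuilt on every collision; B buckets the
-- rows by day first and folds each bucket once with a combiner that normalizes minutes by one unconditional
-- divmod and zero-pads the clock with zfill (alternative decomposition, same cost; return-value equivalence).


-- ===== PORT A =====
-- 'horas += i if i.isdigit()' loops, as left folds over the characters
def pvDigits (s : List Char) : List Char :=
  s.foldl (fun acc i => if PySem.Chars.isdigit i then acc ++ [i] else acc) []

-- int(horas), int(minutos): total via getD 0; Python raises exactly when the digit string is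
-- empty while the source was nonempty — those inputs are excluded by Pre_ below.
def horas_minutos_digitos (hora min : String) : Int × Int :=
  let min := if min = "" then "0" else min
  let hora := if hora = "" then "0" else hora
  let horas := pvDigits hora.toList
  let minutos := pvDigits min.toList
  ((PySem.Int.ofChars? horas).getD 0, (PySem.Int.ofChars? minutos).getD 0)

-- 'hora, min = texto.split(" y ")': any split arity other than 2 raises in Python (outside Pre_)
def hora_minuto_split (texto : String) : Int × Int :=
  if PySem.Str.isIn " y " texto then
    match PySem.Str.split? texto " y " with
    | some [hora, min] => horas_minutos_digitos hora min
    | _ => (0, 0)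
  else if PySem.Str.isIn "hora" texto then
    horas_minutos_digitos texto ""
  else
    horas_minutos_digitos "" texto

-- returns (text, time); int(str(n)) re-parses are exact in Python, ported with getD 0
def horas_texto_a_numero (texto texto_2 : String) : String × String :=
  let hm := hora_minuto_split texto
  let hm2 := hora_minuto_split texto_2
  let horas0 := hm.1 + hm2.1
  let minutos0 := hm.2 + hm2.2
  let horas1 := if minutos0 > 59 then horas0 + PySem.Int.floordiv minutos0 60 else horas0
  let minutos1 := if minutos0 > 59 then PySem.Int.mod minutos0 60 else minutos0
  let horasS := PySem.Int.toChars horas1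
  let minutosS := PySem.Int.toChars minutos1
  if minutosS ≠ ['0'] ∧ horasS ≠ [] then
    let text := horasS ++ (" horas y ").toList ++ minutosS ++ (" min").toList
    let hi := (PySem.Int.ofChars? horasS).getD 0
    let mi := (PySem.Int.ofChars? minutosS).getD 0
    if mi < 10 then
      (String.ofList text, String.ofList (PySem.Int.toChars (10 + hi) ++ (":0").toList ++ minutosS))
    else
      (String.ofList text, String.ofList (PySem.Int.toChars (10 + hi) ++ (":").toList ++ minutosS))
  else if horasS ≠ [] then
    let hi := (PySem.Int.ofChars? horasS).getD 0
    if hi = 1 then ("1 hora", "11:00")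
    else (String.ofList (horasS ++ (" horas").toList), String.ofList (PySem.Int.toChars (10 + hi) ++ (":00").toList))
  else
    let mi := (PySem.Int.ofChars? minutosS).getD 0
    if mi < 10 then (String.ofList (minutosS ++ (" min").toList), String.ofList (("10:0").toList ++ minutosS))
    else (String.ofList (minutosS ++ (" min").toList), String.ofList (("10:").toList ++ minutosS))

def duplicados_horas (lista_horas : List (List String)) : List (List String) :=
  let dias := (PySem.List.pyRange 0 (PySem.List.len lista_horas) 1).foldl
    (fun (dias : PySem.Dict String (List String)) i =>
      (fun (fila : List String) =>
        if dias.contains (PySem.List.pyGetD fila 0 "") then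
          let r := horas_texto_a_numero (PySem.List.pyGetD fila 4 "")
                     (PySem.List.pyGetD (dias.getD (PySem.List.pyGetD fila 0 "") []) 4 "")
          dias.insert (PySem.List.pyGetD fila 0 "")
            [PySem.List.pyGetD fila 0 "", PySem.List.pyGetD fila 1 "", r.2,
             PySem.List.pyGetD fila 3 "", r.1]
        else dias.insert (PySem.List.pyGetD fila 0 "") fila)
      (PySem.List.pyGetD lista_horas i []))
    PySem.Dict.empty
  dias.values

-- ===== PORT B =====
-- divmod(m1+m2, 60) with the literal divisor 60 ≠ 0, ported as the floordiv/mod pair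
def combina (texto_nuevo texto_previo : String) : String × String :=
  let p1 := hora_minuto_split texto_nuevo
  let p2 := hora_minuto_split texto_previo
  let extra := PySem.Int.floordiv (p1.2 + p2.2) 60
  let minutos := PySem.Int.mod (p1.2 + p2.2) 60
  let horas := PySem.Int.toChars (p1.1 + p2.1 + extra)
  if minutos ≠ 0 then
    let mm := PySem.Int.toChars minutos
    (String.ofList (horas ++ (" horas y ").toList ++ mm ++ (" min").toList),
     String.ofList (PySem.Int.toChars (10 + (PySem.Int.ofChars? horas).getD 0) ++ (":").toList ++ PySem.Chars.zfill mm 2))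
  else if (PySem.Int.ofChars? horas).getD 0 = 1 then
    ("1 hora", "11:00")
  else
    (String.ofList (horas ++ (" horas").toList),
     String.ofList (PySem.Int.toChars (10 + (PySem.Int.ofChars? horas).getD 0) ++ (":00").toList))

def grupo_a_fila (dia : String) (filas : List (List String)) : List String :=
  if PySem.List.len filas == 1 then PySem.List.pyGetD filas 0 []
  else
    let th := (PySem.List.slice filas (some 1) none).foldl
      (fun (acc : String × String) fila =>
        combina (PySem.List.pyGetD fila 4 "") acc.1)
      (PySem.List.pyGetD (PySem.List.pyGetD filas 0 []) 4 "", "")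
    let ultima := PySem.List.pyGetD filas (-1) []
    [dia, PySem.List.pyGetD ultima 1 "", th.2, PySem.List.pyGetD ultima 3 "", th.1]

def duplicados_horas_alt (lista_horas : List (List String)) : List (List String) :=
  let grupos : PySem.Dict String (List (List String)) :=
    lista_horas.foldl
      (fun g fila => g.modify (PySem.List.pyGetD fila 0 "") [] (fun l => l ++ [fila]))
      PySem.Dict.empty
  grupos.items.map (fun p => grupo_a_fila p.1 p.2)

-- ===== PRECONDITION & SPEC =====
-- texts whose digit-and-split shape makes horas_minutos_digitos return (no int('') / unpack ValueError)
def pvParseOk (t : String) : Bool :=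
  if PySem.Str.isIn " y " t then
    match PySem.Str.split? t " y " with
    | some [a, b] => (a = "" || a.toList.any PySem.Chars.isdigit)
                      && (b = "" || b.toList.any PySem.Chars.isdigit)
    | _ => false
  else if PySem.Str.isIn "hora" t then t.toList.any PySem.Chars.isdigit
  else (t = "" || t.toList.any PySem.Chars.isdigit)

-- exactly the inputs where the Python A returns: every row nonempty (row[0]), and every row of a
-- day that occurs at least twice has the five columns and a parseable text in column 4
def Pre_duplicados_horas (lista_horas : List (List String)) : Prop :=
  ∀ r ∈ lista_horas, r ≠ [] ∧
    (2 ≤ (lista_horas.map (fun x => PySem.List.pyGetD x 0 "")).count (PySem.List.pyGetD r 0 "") →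
      5 ≤ r.length ∧ pvParseOk (PySem.List.pyGetD r 4 "") = true)
instance (lista_horas : List (List String)) : Decidable (Pre_duplicados_horas lista_horas) := by
  unfold Pre_duplicados_horas; infer_instance

def pvWitness_duplicados_horas : List (List String) :=
  [["01/05", "10:00", "11:00", "Desc", "1 hora"],
   ["01/05", "10:00", "11:00", "Desc", "30 min"],
   ["02/05", "09:00", "10:00", "Otra", "x"]]

def Spec_duplicados_horas (lista_horas : List (List String)) (out : List (List String)) : Prop :=
  out = duplicados_horas_alt lista_horas
instance (lista_horas : List (List String)) (out : List (List String)) :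
    Decidable (Spec_duplicados_horas lista_horas out) := by
  unfold Spec_duplicados_horas; infer_instance

-- ===== CLAIM (what is proved, stated in full; the proofs are below) =====
def Claim_equal_duplicados_horas : Prop := ∀ (lista_horas : List (List String)), Dom_duplicados_horas lista_horas → Pre_duplicados_horas lista_horas → Spec_duplicados_horas lista_horas (duplicados_horas lista_horas)

-- ===== LEMMAS AND PROOFS =====

-- B's combiner agrees with A's text combiner on every pair of texts.
theorem pv_bind_nonneg (X : Option Nat) :
    0 ≤ ((Option.map (fun n : Int => n) (X.bind fun a => pure ((a : Int)))).getD 0) := by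
  cases X <;> simp

theorem pv_dw_self (l : List Char) (h : ∀ c ∈ l, PySem.Int.isIntSpace c = false) :
    List.dropWhile PySem.Int.isIntSpace l = l := by
  cases l with
  | nil => rfl
  | cons c t => simp [h c (by simp)]

theorem pv_digits_nonneg (ds : List Char) (h : ∀ c ∈ ds, PySem.Chars.isdigit c = true) :
    0 ≤ (PySem.Int.ofChars? ds).getD 0 := by
  have hsp : ∀ c ∈ ds, PySem.Int.isIntSpace c = false := by
    intro c hc
    have hd := h c hc
    simp [PySem.Chars.isdigit] at hd
    simp only [PySem.Int.isIntSpace, Bool.or_eq_false_iff, decide_eq_false_iff_not]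
    refine ⟨⟨⟨⟨⟨?_, ?_⟩, ?_⟩, ?_⟩, ?_⟩, ?_⟩ <;> (rintro rfl; revert hd; decide)
  have hsp' : ∀ c ∈ ds.reverse, PySem.Int.isIntSpace c = false := by
    intro c hc; exact hsp c (List.mem_reverse.mp hc)
  simp only [PySem.Int.ofChars?]
  rw [pv_dw_self ds hsp, pv_dw_self ds.reverse hsp', List.reverse_reverse]
  split
  · have := h '-' (by simp)
    simp [PySem.Chars.isdigit] at this
  · have := h '+' (by simp)
    simp [PySem.Chars.isdigit] at this
  · exact pv_bind_nonneg _

theorem pv_pvDigits_eq_filter (cs : List Char) :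
    pvDigits cs = cs.filter PySem.Chars.isdigit := by
  unfold pvDigits
  simpa using PySem.List.foldl_append_if_eq_filter PySem.Chars.isdigit cs []

theorem pv_hmd_nonneg (a b : String) :
    0 ≤ (horas_minutos_digitos a b).1 ∧ 0 ≤ (horas_minutos_digitos a b).2 := by
  unfold horas_minutos_digitos
  constructor <;>
  · simp only [pv_pvDigits_eq_filter]
    apply pv_digits_nonneg
    intro c hc
    exact (List.mem_filter.mp hc).2

theorem pv_split_nonneg (t : String) :
    0 ≤ (hora_minuto_split t).1 ∧ 0 ≤ (hora_minuto_split t).2 := by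
  unfold hora_minuto_split
  split
  · split
    · exact pv_hmd_nonneg _ _
    · simp
  · split
    · exact pv_hmd_nonneg _ _
    · exact pv_hmd_nonneg _ _

theorem pv_tdc_ne_nil (b : Nat) : ∀ (f n : Nat) (acc : List Char), acc ≠ [] →
    Nat.toDigitsCore b f n acc ≠ [] := by
  intro f
  induction f with
  | zero => intro n acc h; simpa [Nat.toDigitsCore] using h
  | succ f ih =>
    intro n acc h
    rw [Nat.toDigitsCore]
    split
    · simp
    · exact ih _ _ (by simp)

theorem pv_toChars_ne_nil (n : Int) : PySem.Int.toChars n ≠ [] := by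
  unfold PySem.Int.toChars
  split
  · simp
  · unfold Nat.toDigits
    rw [Nat.toDigitsCore]
    split
    · simp
    · exact pv_tdc_ne_nil _ _ _ _ (by simp)

theorem combina_eq (t1 t2 : String) : combina t1 t2 = horas_texto_a_numero t1 t2 := by
  obtain ⟨ha1, ha2⟩ := pv_split_nonneg t1
  obtain ⟨hb1, hb2⟩ := pv_split_nonneg t2
  simp only [combina, horas_texto_a_numero]
  have e1 : (if (hora_minuto_split t1).2 + (hora_minuto_split t2).2 > 59 then
        (hora_minuto_split t1).1 + (hora_minuto_split t2).1 +
          PySem.Int.floordiv ((hora_minuto_split t1).2 + (hora_minuto_split t2).2) 60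
      else (hora_minuto_split t1).1 + (hora_minuto_split t2).1) =
      (hora_minuto_split t1).1 + (hora_minuto_split t2).1 +
        PySem.Int.floordiv ((hora_minuto_split t1).2 + (hora_minuto_split t2).2) 60 := by
    split_ifs with h
    · rfl
    · rw [PySem.Int.floordiv_eq_ediv_of_pos (by norm_num : (0:Int) < 60)]
      omega
  have e2 : (if (hora_minuto_split t1).2 + (hora_minuto_split t2).2 > 59 then
        PySem.Int.mod ((hora_minuto_split t1).2 + (hora_minuto_split t2).2) 60
      else (hora_minuto_split t1).2 + (hora_minuto_split t2).2) =
      PySem.Int.mod ((hora_minuto_split t1).2 + (hora_minuto_split t2).2) 60 := by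
    split_ifs with h
    · rfl
    · rw [PySem.Int.mod_eq_emod_of_pos (by norm_num : (0:Int) < 60)]
      omega
  rw [e1, e2]
  set m := PySem.Int.mod ((hora_minuto_split t1).2 + (hora_minuto_split t2).2) 60 with hm
  have hm0 : 0 ≤ m := PySem.Int.mod_nonneg _ (by norm_num)
  have hm60 : m < 60 := PySem.Int.mod_lt _ (by norm_num)
  set H := (hora_minuto_split t1).1 + (hora_minuto_split t2).1 +
    PySem.Int.floordiv ((hora_minuto_split t1).2 + (hora_minuto_split t2).2) 60 with hH
  clear_value m H
  clear hm hH ha1 ha2 hb1 hb2 e1 e2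
  by_cases hz : m = 0
  · subst hz
    simp only [show PySem.Int.toChars (0 : Int) = ['0'] from by decide]
    simp [pv_toChars_ne_nil H]
  · have hr : (PySem.Int.ofChars? (PySem.Int.toChars m)).getD 0 = m := by
      interval_cases m <;> decide
    have hchar : PySem.Int.toChars m ≠ ['0'] := by
      intro he
      rw [he] at hr
      exact hz (by simpa using hr.symm)
    rw [if_pos (And.intro hchar (pv_toChars_ne_nil H)), if_pos hz, hr]
    by_cases hlt : m < 10
    · rw [if_pos hlt]
      have hz2 : PySem.Chars.zfill (PySem.Int.toChars m) 2 = '0' :: PySem.Int.toChars m := by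
        interval_cases m <;> decide
      rw [hz2]
      simp only [List.append_assoc]
      rfl
    · rw [if_neg hlt]
      have h10 : 10 ≤ m := by omega
      have hz2 : PySem.Chars.zfill (PySem.Int.toChars m) 2 = PySem.Int.toChars m := by
        interval_cases m <;> decide
      rw [hz2]

-- the fold of B's bucket, rewritten with A's combiner (proof-side shape of grupo_a_fila)
def pvGrupoA (dia : String) (filas : List (List String)) : List String :=
  if PySem.List.len filas == 1 then PySem.List.pyGetD filas 0 []
  else
    let th := (PySem.List.slice filas (some 1) none).foldl
      (fun (acc : String × String) fila =>
        horas_texto_a_numero (PySem.List.pyGetD fila 4 "") acc.1)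
      (PySem.List.pyGetD (PySem.List.pyGetD filas 0 []) 4 "", "")
    let ultima := PySem.List.pyGetD filas (-1) []
    [dia, PySem.List.pyGetD ultima 1 "", th.2, PySem.List.pyGetD ultima 3 "", th.1]

theorem grupo_a_fila_eq (dia : String) (filas : List (List String)) :
    grupo_a_fila dia filas = pvGrupoA dia filas := by
  unfold grupo_a_fila pvGrupoA
  have hfun : (fun (acc : String × String) (fila : List String) =>
      combina (PySem.List.pyGetD fila 4 "") acc.1) =
      (fun (acc : String × String) (fila : List String) =>
        horas_texto_a_numero (PySem.List.pyGetD fila 4 "") acc.1) := by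
    funext acc fila; exact combina_eq _ _
  rw [hfun]

-- key of a row, A's step on the dict of representative rows, B's bucketing step
def pvKey (r : List String) : String := PySem.List.pyGetD r 0 ""

def pvStepA (dias : PySem.Dict String (List String)) (fila : List String) :
    PySem.Dict String (List String) :=
  if dias.contains (pvKey fila) then
    let r := horas_texto_a_numero (PySem.List.pyGetD fila 4 "")
               (PySem.List.pyGetD (dias.getD (pvKey fila) []) 4 "")
    dias.insert (pvKey fila)
      [pvKey fila, PySem.List.pyGetD fila 1 "", r.2, PySem.List.pyGetD fila 3 "", r.1]
  else dias.insert (pvKey fila) fila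

def pvStepB (g : PySem.Dict String (List (List String))) (fila : List String) :
    PySem.Dict String (List (List String)) :=
  g.modify (pvKey fila) [] (fun l => l ++ [fila])

def pvEmit (p : String × List (List String)) : String × List String :=
  (p.1, pvGrupoA p.1 p.2)

theorem pv_key_lemma (k : String) (G : List (List String)) (r : List String) (hG : G ≠ []) :
    pvGrupoA k (G ++ [r]) =
      [k, PySem.List.pyGetD r 1 "",
       (horas_texto_a_numero (PySem.List.pyGetD r 4 "")
         (PySem.List.pyGetD (pvGrupoA k G) 4 "")).2,
       PySem.List.pyGetD r 3 "",
       (horas_texto_a_numero (PySem.List.pyGetD r 4 "")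
         (PySem.List.pyGetD (pvGrupoA k G) 4 "")).1] := by
  obtain ⟨x, G', rfl⟩ := List.exists_cons_of_ne_nil hG
  have hcond : (PySem.List.len (x :: G' ++ [r]) == 1) = false := by
    simp [PySem.List.len_eq]
    omega
  rw [pvGrupoA, hcond]
  simp only [Bool.false_eq_true, if_false]
  rw [PySem.List.slice_from_one]
  simp only [List.cons_append, List.tail_cons, List.foldl_append, List.foldl_cons,
    PySem.List.pyGetD_zero_cons]
  rw [show x :: (G' ++ [r]) = (x :: G') ++ [r] by simp, PySem.List.pyGetD_neg_one_append_singleton]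
  simp only [List.foldl_nil]
  cases G' with
  | nil =>
    simp [pvGrupoA, PySem.List.pyGetD_zero_cons]
  | cons y G'' =>
    have h2 : (PySem.List.len (x :: y :: G'') == 1) = false := by
      simp [PySem.List.len_eq]
      omega
    rw [pvGrupoA, h2]
    simp only [Bool.false_eq_true, if_false]
    rw [PySem.List.slice_from_one]
    simp only [List.tail_cons, List.foldl_cons, PySem.List.pyGetD_zero_cons]
    rfl

theorem pv_invariant (l : List (List String)) :
    (l.foldl pvStepA PySem.Dict.empty).items =
      ((l.foldl pvStepB PySem.Dict.empty).items).map pvEmit ∧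
    (∀ p ∈ (l.foldl pvStepB PySem.Dict.empty).items, p.2 ≠ []) ∧
    (l.foldl pvStepB PySem.Dict.empty).keys.Nodup := by
  induction l using List.reverseRecOn with
  | nil =>
    refine ⟨rfl, by simp [PySem.Dict.empty], by simp [PySem.Dict.empty, PySem.Dict.keys]⟩
  | append_singleton l r ih =>
    obtain ⟨h1, h2, h3⟩ := ih
    simp only [List.foldl_append, List.foldl_cons, List.foldl_nil]
    set dA := l.foldl pvStepA PySem.Dict.empty with hdA
    set dB := l.foldl pvStepB PySem.Dict.empty with hdB
    have hkeys : dA.keys = dB.keys := by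
      simp only [PySem.Dict.keys, h1, List.map_map]
      rfl
    have hcont : dA.contains (pvKey r) = dB.contains (pvKey r) := by
      simp [PySem.Dict.contains_eq_decide_mem_keys, hkeys]
    have hBstep : pvStepB dB r = dB.insert (pvKey r) (dB.getD (pvKey r) [] ++ [r]) := rfl
    by_cases hc : dB.contains (pvKey r) = true
    · have hcA : dA.contains (pvKey r) = true := by rw [hcont]; exact hc
      have hnodA : dA.keys.Nodup := by rw [hkeys]; exact h3
      refine ⟨?_, ?_, ?_⟩
      · rw [pvStepA, if_pos hcA, hBstep,
            PySem.Dict.items_insert_of_contains dA _ hcA,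
            PySem.Dict.items_insert_of_contains dB _ hc,
            h1, List.map_map, List.map_map]
        apply List.map_congr_left
        intro q hq
        by_cases hqk : (q.1 == pvKey r) = true
        · have hq1 : q.1 = pvKey r := by simpa using hqk
          have hmem : (q.1, pvGrupoA q.1 q.2) ∈ dA.items := by
            rw [h1]
            exact List.mem_map_of_mem hq
          have hgetB : dB.getD (pvKey r) [] = q.2 := by
            rw [← hq1]
            exact PySem.Dict.getD_of_mem_items dB (by exact hq) h3 []
          have hgetA : dA.getD (pvKey r) [] = pvGrupoA q.1 q.2 := by
            rw [← hq1]
            exact PySem.Dict.getD_of_mem_items dA hmem hnodA []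
          simp only [Function.comp_apply, pvEmit, hqk, if_pos, hgetB, hgetA]
          rw [pv_key_lemma (pvKey r) q.2 r (h2 q hq), hq1]
        · simp only [Function.comp_apply, pvEmit, hqk, Bool.false_eq_true, if_false]
      · intro p hp
        rw [hBstep, PySem.Dict.items_insert_of_contains dB _ hc] at hp
        obtain ⟨q, hq, rfl⟩ := List.mem_map.mp hp
        by_cases hqk : (q.1 == pvKey r) = true
        · simp only [hqk, if_pos]
          simp
        · simp only [hqk, Bool.false_eq_true, if_false]
          exact h2 q hq
      · rw [hBstep, PySem.Dict.keys_insert_of_contains dB _ hc]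
        exact h3
    · have hc' : dB.contains (pvKey r) = false := by simpa using hc
      have hcA : dA.contains (pvKey r) = false := by rw [hcont]; exact hc'
      have hget0 : dB.getD (pvKey r) [] = [] := PySem.Dict.getD_of_not_contains dB [] hc'
      have hsing : pvGrupoA (pvKey r) [r] = r := by
        simp [pvGrupoA, PySem.List.pyGetD_zero_cons]
      refine ⟨?_, ?_, ?_⟩
      · rw [pvStepA, if_neg (by simp [hcA]), hBstep, hget0,
            PySem.Dict.items_insert_of_not_contains dA _ hcA,
            PySem.Dict.items_insert_of_not_contains dB _ hc',
            List.map_append, h1]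
        simp [pvEmit, hsing]
      · intro p hp
        rw [hBstep, hget0, PySem.Dict.items_insert_of_not_contains dB _ hc'] at hp
        rcases List.mem_append.mp hp with h | h
        · exact h2 p h
        · simp only [List.mem_singleton] at h
          subst h
          simp
      · rw [hBstep, PySem.Dict.keys_insert_of_not_contains dB _ hc']
        have hnm : pvKey r ∉ dB.keys := by
          rw [PySem.Dict.contains_eq_decide_mem_keys] at hc'
          simpa using hc'
        simp only [List.nodup_append, List.nodup_singleton, true_and]
        refine ⟨h3, ?_⟩
        intro a ha b hb
        simp only [List.mem_singleton] at hb
        subst hb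
        exact fun hEq => hnm (hEq ▸ ha)

theorem duplicados_horas_eq_foldA (lista_horas : List (List String)) :
    duplicados_horas lista_horas = (lista_horas.foldl pvStepA PySem.Dict.empty).values := by
  unfold duplicados_horas
  change (List.foldl (fun dias i => pvStepA dias (PySem.List.pyGetD lista_horas i []))
      PySem.Dict.empty (PySem.List.pyRange 0 (PySem.List.len lista_horas))).values = _
  rw [PySem.List.foldl_pyRange_zero_pyGetD lista_horas [] pvStepA PySem.Dict.empty]

theorem duplicados_horas_alt_eq (lista_horas : List (List String)) :
    duplicados_horas_alt lista_horas =
      ((lista_horas.foldl pvStepB PySem.Dict.empty).items).map (fun p => pvGrupoA p.1 p.2) := by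
  unfold duplicados_horas_alt
  change ((lista_horas.foldl pvStepB PySem.Dict.empty).items).map
      (fun p => grupo_a_fila p.1 p.2) = _
  apply List.map_congr_left
  intro q _
  exact grupo_a_fila_eq q.1 q.2

-- ===== VERDICT (by name: the statement is the Claim_ definition above) =====
theorem duplicados_horas_spec : Claim_equal_duplicados_horas := by
  intro l _ _
  unfold Spec_duplicados_horas
  rw [duplicados_horas_eq_foldA, duplicados_horas_alt_eq]
  have h := (pv_invariant l).1
  simp only [PySem.Dict.values, h, List.map_map]
  rfl
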